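-- pv_equiv track=rewrite | github.com/tcyxhw/formflow | scripts/check_edit_drift.py | is_file_in_zone
-- ===== SOURCE A (Python) =====
-- from typing import Any, Dict, List, Optional, Set
--
-- def normalize_zone(zone: str) -> Set[str]:
--     """Normalize a zone to set of path prefixes for matching."""
--     zone = zone.lower().strip()
--     prefixes = set()
--
--     parts = zone.replace(":", "/").replace("\\", "/").split("/")
--     for i in range(len(parts)):
--         prefix = "/".join(parts[:i+1])
--         prefixes.add(prefix)
--         prefixes.add(parts[i])
--
--     return prefixes
--
-- def is_file_in_zone(file_path: str, zones: List[str]) -> bool: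
--     """Check if a file path matches any of the expected zones."""
--     file_path = file_path.lower()
--
--     for zone in zones:
--         zone_prefixes = normalize_zone(zone)
--         for prefix in zone_prefixes:
--             if prefix in file_path:
--                 return True
--
--     return False
-- ===== SOURCE B (Python) =====
-- def is_file_in_zone(file_path, zones):
--     """Check if a file path matches any of the expected zones (no prefix set needed)."""
--     file_path = file_path.lower()
--     for zone in zones:
--         parts = zone.lower().strip().replace(":", "/").replace("\\", "/").split("/")
--         if any(part in file_path for part in parts):
--             return True
--     return False
-- ===== Notes on version B (the rewrite author's own statement) =====
-- stated objective: simpler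
-- what changed: B drops the normalize_zone prefix-set construction entirely: since a cumulative prefix 'a/b' can only be a substring of the path when its first component 'a' already is, B just splits each zone and tests the individual parts, removing the helper, the set and the join loop.
import Mathlib
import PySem

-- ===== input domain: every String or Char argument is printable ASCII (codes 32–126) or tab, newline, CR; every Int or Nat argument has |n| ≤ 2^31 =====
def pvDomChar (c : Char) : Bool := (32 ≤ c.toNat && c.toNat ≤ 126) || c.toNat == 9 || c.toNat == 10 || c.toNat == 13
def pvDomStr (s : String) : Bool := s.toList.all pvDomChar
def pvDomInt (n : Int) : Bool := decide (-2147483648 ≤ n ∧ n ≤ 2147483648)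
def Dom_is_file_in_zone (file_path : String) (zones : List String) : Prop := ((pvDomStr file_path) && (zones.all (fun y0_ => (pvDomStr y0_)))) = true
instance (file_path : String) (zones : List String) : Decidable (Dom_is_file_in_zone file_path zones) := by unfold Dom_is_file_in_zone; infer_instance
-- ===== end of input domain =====

-- B drops A's normalize_zone prefix-set construction: only the individual zone parts are
-- tested as substrings (a cumulative 'a/b' can only match when 'a' already does) — simpler.

-- ===== PORT A =====
-- split("/") has a nonempty separator, so Str.split? is always `some`; `.getD []` is unreachable.
def normalize_zone (zone : String) : PySem.Set String :=
  let z := PySem.Str.strip (PySem.Str.lower zone)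
  let parts := (PySem.Str.split? (PySem.Str.replace (PySem.Str.replace z ":" "/") "\\" "/") "/").getD []
  (List.range parts.length).foldl
    (fun prefixes i =>
      let pre := PySem.Str.join "/" (parts.take (i + 1))
      PySem.Set.add (PySem.Set.add prefixes pre) (parts.getD i ""))
    PySem.Set.empty

def is_file_in_zone (file_path : String) (zones : List String) : Bool :=
  let fp := PySem.Str.lower file_path
  zones.any (fun zone => (normalize_zone zone).any (fun pre => PySem.Str.isIn pre fp))

-- ===== PORT B =====
def is_file_in_zone_alt (file_path : String) (zones : List String) : Bool :=
  let fp := PySem.Str.lower file_path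
  zones.any (fun zone =>
    let parts := (PySem.Str.split? (PySem.Str.replace (PySem.Str.replace (PySem.Str.strip (PySem.Str.lower zone)) ":" "/") "\\" "/") "/").getD []
    parts.any (fun part => PySem.Str.isIn part fp))

-- ===== PRECONDITION & SPEC =====
def Spec_is_file_in_zone (file_path : String) (zones : List String) (out : Bool) : Prop := out = is_file_in_zone_alt file_path zones
instance (file_path : String) (zones : List String) (out : Bool) : Decidable (Spec_is_file_in_zone file_path zones out) := by unfold Spec_is_file_in_zone; infer_instance

-- ===== CLAIM (what is proved, stated in full; the proofs are below) =====
def Claim_equal_is_file_in_zone : Prop := ∀ (file_path : String) (zones : List String), Dom_is_file_in_zone file_path zones → Spec_is_file_in_zone file_path zones (is_file_in_zone file_path zones)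

-- ===== LEMMAS AND PROOFS =====

-- membership in A's set-building fold
lemma mem_foldl_add2 (f g : Nat → String) (l : List Nat) (s0 : PySem.Set String) (x : String) :
    x ∈ l.foldl (fun s i => PySem.Set.add (PySem.Set.add s (f i)) (g i)) s0 ↔
      x ∈ s0 ∨ ∃ i ∈ l, x = f i ∨ x = g i := by
  induction l generalizing s0 with
  | nil => simp
  | cons a t ih =>
    simp only [List.foldl_cons, ih, PySem.Set.mem_add, List.mem_cons]
    constructor
    · rintro (((h | h) | h) | ⟨i, hi, h⟩)
      · exact Or.inl h
      · exact Or.inr ⟨a, Or.inl rfl, Or.inl h⟩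
      · exact Or.inr ⟨a, Or.inl rfl, Or.inr h⟩
      · exact Or.inr ⟨i, Or.inr hi, h⟩
    · rintro (h | ⟨i, (rfl | hi), h⟩)
      · exact Or.inl (Or.inl (Or.inl h))
      · rcases h with h | h
        · exact Or.inl (Or.inl (Or.inr h))
        · exact Or.inl (Or.inr h)
      · exact Or.inr ⟨i, hi, h⟩

-- the first part is a prefix of every join
lemma prefix_join (p : String) (rest : List String) :
    p.toList <+: (PySem.Str.join "/" (p :: rest)).toList := by
  rw [PySem.Str.toList_join]
  cases rest with
  | nil => simp [PySem.Chars.join_singleton]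
  | cons q t =>
    rw [List.map_cons, List.map_cons, PySem.Chars.join_cons_cons, List.append_assoc]
    exact List.prefix_append _ _

-- per zone: "some prefix in the set matches" = "some part matches"
lemma zone_any (fp : String) (parts : List String) :
    ((List.range parts.length).foldl
        (fun prefixes i =>
          PySem.Set.add (PySem.Set.add prefixes (PySem.Str.join "/" (parts.take (i + 1)))) (parts.getD i ""))
        PySem.Set.empty).any (fun pre => PySem.Str.isIn pre fp)
      = parts.any (fun part => PySem.Str.isIn part fp) := by
  rw [Bool.eq_iff_iff]
  simp only [List.any_eq_true]
  constructor
  · rintro ⟨x, hx, hm⟩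
    rw [mem_foldl_add2] at hx
    rcases hx with h | ⟨i, hi, h⟩
    · simp [PySem.Set.empty] at h
    · rw [List.mem_range] at hi
      rcases h with rfl | rfl
      · -- a cumulative join matched: its first component matches too
        rcases parts with _ | ⟨p, rest⟩
        · simp at hi
        · refine ⟨p, List.mem_cons_self, ?_⟩
          rw [PySem.Str.isIn_iff_infix] at hm ⊢
          rw [List.take_succ_cons] at hm
          exact ((prefix_join p (rest.take i)).isInfix).trans hm
      · refine ⟨parts[i], List.getElem_mem hi, ?_⟩
        rwa [List.getD_eq_getElem?_getD, List.getElem?_eq_getElem hi, Option.getD_some] at hm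
  · rintro ⟨part, hp, hm⟩
    rcases List.mem_iff_getElem.mp hp with ⟨i, hi, rfl⟩
    refine ⟨parts.getD i "", ?_, ?_⟩
    · rw [mem_foldl_add2]
      exact Or.inr ⟨i, List.mem_range.mpr hi, Or.inr rfl⟩
    · rwa [List.getD_eq_getElem?_getD, List.getElem?_eq_getElem hi, Option.getD_some]

-- ===== VERDICT (by name: the statement is the Claim_ definition above) =====
theorem is_file_in_zone_spec : Claim_equal_is_file_in_zone := by
  intro file_path zones _
  unfold Spec_is_file_in_zone is_file_in_zone is_file_in_zone_alt normalize_zone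
  refine PySem.List.any_congr_mem ?_
  intro zone _
  exact zone_any (PySem.Str.lower file_path) _
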